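-- pv_equiv track=rewrite | github.com/uzh-rpg/event_representation_study | gryffin/src/gryffin/descriptor_generator/descriptor_generator.py | _custom_array_split
-- ===== SOURCE A (Python) =====
-- def _custom_array_split(feature_types, feature_indices, num_splits):
--     """Split feature indices into N splits such that the categorical variables are distributed evenly across
--     splits. This matters because we run the generation only for categorical variables, so we do not want to have
--     a process without any and other with multiple ones."""
--
--     # sort the feature indices according to the alphabetical order of the feature types, so that we get, e.g.:
--     # ['categorical', 'continuous', 'discrete', 'categorical', 'categorical']
--     # ==> ['categorical', 'categorical', 'categorical', 'continuous', 'discrete', ]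
--     feature_types_sorted, feature_indices_sorted = zip(
--         *sorted(zip(feature_types, feature_indices))
--     )
--
--     # create a 2D list
--     feature_indices_splits = [[] for n in range(num_splits)]
--
--     # distribute indices across splits
--     for i, feature_index in enumerate(feature_indices_sorted):
--         split_idx = i % num_splits
--         feature_indices_splits[split_idx].append(feature_index)
--
--     return feature_indices_splits
-- ===== SOURCE B (Python) =====
-- def _custom_array_split(feature_types, feature_indices, num_splits):
--     # sort pairs, then deal round-robin by taking every num_splits-th element per split
--     _, feature_indices_sorted = zip(*sorted(zip(feature_types, feature_indices)))
--     return [list(feature_indices_sorted[k::num_splits]) for k in range(num_splits)]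
-- ===== Notes on version B (the rewrite author's own statement) =====
-- stated objective: idiomatic
-- what changed: The enumerate-and-mutate round-robin distribution loop (append to bucket i % num_splits) is replaced by building each split directly with a strided slice feature_indices_sorted[k::num_splits]; the sort is kept.
import Mathlib
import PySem

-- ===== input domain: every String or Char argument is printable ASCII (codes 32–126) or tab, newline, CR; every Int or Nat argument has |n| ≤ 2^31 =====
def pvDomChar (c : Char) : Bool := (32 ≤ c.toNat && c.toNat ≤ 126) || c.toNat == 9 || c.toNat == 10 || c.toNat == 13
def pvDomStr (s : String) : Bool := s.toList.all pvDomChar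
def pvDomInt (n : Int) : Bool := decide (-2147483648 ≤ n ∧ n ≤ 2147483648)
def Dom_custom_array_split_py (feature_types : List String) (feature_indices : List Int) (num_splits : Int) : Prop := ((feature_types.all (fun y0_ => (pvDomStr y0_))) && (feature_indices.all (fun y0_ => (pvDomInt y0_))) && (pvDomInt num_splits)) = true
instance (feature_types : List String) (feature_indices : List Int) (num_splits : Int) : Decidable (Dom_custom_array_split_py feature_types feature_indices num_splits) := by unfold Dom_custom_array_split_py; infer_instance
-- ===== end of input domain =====

-- B replaces A's enumerate-and-mutate round-robin loop by per-split strided slices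
-- feature_indices_sorted[k::num_splits] (idiomatic; same sort, same cost).


-- ===== PORT A =====
-- sorted(zip(ft, fi)) sorts pairs by Python tuple comparison = PySem.List.sorted2 fst snd;
-- bucket creation [[] for n in range(num_splits)], then the enumerate loop appends to bucket i % num_splits.
def custom_array_split_py (feature_types : List String) (feature_indices : List Int) (num_splits : Int) : List (List Int) :=
  let pairs := List.zip feature_types feature_indices
  let sortedPairs := PySem.List.sorted2 pairs Prod.fst Prod.snd
  let feature_indices_sorted := sortedPairs.map Prod.snd
  let feature_indices_splits : List (List Int) := (PySem.List.pyRange 0 num_splits 1).map (fun _ => [])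
  (PySem.List.enumerate feature_indices_sorted 0).foldl
    (fun acc p => acc.modify (PySem.Int.mod p.1 num_splits).toNat (fun b => b ++ [p.2]))
    feature_indices_splits

-- ===== PORT B =====
-- same sort, then each split is the strided slice feature_indices_sorted[k::num_splits].
-- slice? is none only for step 0, which no k drawn from a nonempty range(num_splits) allows; .getD [] discharges the Option.
def custom_array_split_py_alt (feature_types : List String) (feature_indices : List Int) (num_splits : Int) : List (List Int) :=
  let pairs := List.zip feature_types feature_indices
  let sortedPairs := PySem.List.sorted2 pairs Prod.fst Prod.snd
  let feature_indices_sorted := sortedPairs.map Prod.snd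
  (PySem.List.pyRange 0 num_splits 1).map
    (fun k => (PySem.List.slice? feature_indices_sorted (some k) none num_splits).getD [])

-- ===== PRECONDITION & SPEC =====
-- Pre_ is exactly where the Python A returns: zip(ft, fi) nonempty (else the unpacking of
-- zip(*sorted(...)) raises ValueError) and num_splits ≥ 1 (num_splits = 0 raises
-- ZeroDivisionError at i % num_splits, negative num_splits raises IndexError on the empty bucket list).
def Pre_custom_array_split_py (feature_types : List String) (feature_indices : List Int) (num_splits : Int) : Prop :=
  List.zip feature_types feature_indices ≠ [] ∧ 1 ≤ num_splits
instance (feature_types : List String) (feature_indices : List Int) (num_splits : Int) : Decidable (Pre_custom_array_split_py feature_types feature_indices num_splits) := by unfold Pre_custom_array_split_py; infer_instance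
def pvWitness_custom_array_split_py : List String × List Int × Int := (["categorical", "continuous", "categorical"], [0, 1, 2], 2)
def Spec_custom_array_split_py (feature_types : List String) (feature_indices : List Int) (num_splits : Int) (out : List (List Int)) : Prop := out = custom_array_split_py_alt feature_types feature_indices num_splits
instance (feature_types : List String) (feature_indices : List Int) (num_splits : Int) (out : List (List Int)) : Decidable (Spec_custom_array_split_py feature_types feature_indices num_splits out) := by unfold Spec_custom_array_split_py; infer_instance

-- ===== CLAIM (what is proved, stated in full; the proofs are below) =====
def Claim_equal_custom_array_split_py : Prop := ∀ (feature_types : List String) (feature_indices : List Int) (num_splits : Int), Dom_custom_array_split_py feature_types feature_indices num_splits → Pre_custom_array_split_py feature_types feature_indices num_splits → Spec_custom_array_split_py feature_types feature_indices num_splits (custom_array_split_py feature_types feature_indices num_splits)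

-- ===== LEMMAS AND PROOFS =====

theorem pvRange_pos_nil (a b m : Int) (hm : 0 < m) (h : b ≤ a) :
    PySem.List.pyRange a b m = [] := by
  rw [PySem.List.pyRange_of_pos a b hm]
  simp [show ¬ a < b by omega]

theorem pvRange_pos_cons (a b m : Int) (hm : 0 < m) (h : a < b) :
    PySem.List.pyRange a b m = a :: PySem.List.pyRange (a + m) b m := by
  rw [PySem.List.pyRange_of_pos a b hm, PySem.List.pyRange_of_pos (a+m) b hm]
  have hkey : (b - a + m - 1) / m = (b - a - 1) / m + 1 := by
    have : b - a + m - 1 = (b - a - 1) + 1 * m := by ring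
    rw [this, Int.add_mul_ediv_right _ _ (by omega : m ≠ 0)]
  by_cases h2 : a + m < b
  · have hnn : 0 ≤ (b - a - 1) / m := Int.ediv_nonneg (by omega) (by omega)
    have hc : ((b - a + m - 1) / m).toNat = ((b - (a + m) + m - 1) / m).toNat + 1 := by
      rw [hkey]
      have : b - (a + m) + m - 1 = b - a - 1 := by ring
      rw [this]
      omega
    simp only [if_pos h, if_pos h2, hc, List.range_succ_eq_map, List.map_cons, List.map_map]
    refine List.cons_eq_cons.mpr ⟨by simp, ?_⟩
    apply List.map_congr_left
    intro k _
    simp [Function.comp]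
    ring
  · have hz : (b - a - 1) / m = 0 := Int.ediv_eq_zero_of_lt (by omega) (by omega)
    have hc : ((b - a + m - 1) / m).toNat = 1 := by rw [hkey, hz]; rfl
    simp [if_pos h, if_neg h2, hc, List.range_succ]

theorem pvMod_shift (m j a r : Int) (_hm : 0 < m) (hj : 0 ≤ j) (hjm : j < m)
    (ha : a % m = j) (hr : 1 ≤ r) (hrm : r < m) : (a + r) % m ≠ j := by
  have hed := Int.emod_add_mul_ediv a m
  have h1 : (a + r) % m = (j + r) % m := by
    have : a + r = (j + r) + m * (a / m) := by omega
    rw [this, Int.add_mul_emod_self_left]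
  by_cases h2 : j + r < m
  · rw [h1, Int.emod_eq_of_lt (by omega) h2]; omega
  · have h3 : (j + r) % m = (j + r - m) % m := (Int.sub_emod_right (j + r) m).symm
    rw [h1, h3, Int.emod_eq_of_lt (by omega) (by omega)]; omega

theorem pvFilter_congr_range (m j : Nat) (hm : 0 < m) (hj : j < m) :
    ∀ (fuel : Nat) (a b : Int), 0 ≤ a → (b - a).toNat ≤ fuel →
      PySem.Int.mod a m = (j : Int) →
      (PySem.List.pyRange a b 1).filter (fun i => PySem.Int.mod i (m : Int) == (j : Int))
        = PySem.List.pyRange a b (m : Int) := by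
  have hmz : (0:Int) < (m:Int) := by exact_mod_cast hm
  have hmod : ∀ x : Int, PySem.Int.mod x (m:Int) = x % (m:Int) := by
    intro x; exact PySem.Int.mod_eq_emod_of_pos hmz
  intro fuel
  induction fuel with
  | zero =>
    intro a b h0 hf hmodeq
    have hba : b ≤ a := by omega
    rw [PySem.List.pyRange_one_eq_nil hba, pvRange_pos_nil a b _ hmz hba]
    rfl
  | succ fuel ih =>
    intro a b h0 hf hmodeq
    by_cases hba : b ≤ a
    · rw [PySem.List.pyRange_one_eq_nil hba, pvRange_pos_nil a b _ hmz hba]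
      rfl
    · push Not at hba
      rw [pvRange_pos_cons a b _ hmz hba]
      have hmid1 : a ≤ min (a + m) b := by omega
      have hmid2 : min (a + m) b ≤ b := by omega
      rw [PySem.List.pyRange_one_append a (min (a + m) b) b hmid1 hmid2,
          PySem.List.pyRange_one_cons (by omega : a < min (a + m) b),
          List.filter_append, List.filter_cons]
      have hcond : (PySem.Int.mod a (m:Int) == (j:Int)) = true := by
        simp [hmodeq]
      rw [if_pos hcond]
      have hmid_nil :
          (PySem.List.pyRange (a + 1) (min (a + m) b) 1).filter
            (fun i => PySem.Int.mod i (m : Int) == (j : Int)) = [] := by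
        rw [List.filter_eq_nil_iff]
        intro i hi
        rw [PySem.List.mem_pyRange_one] at hi
        have : (a + (i - a)) % (m:Int) ≠ (j:Int) := by
          apply pvMod_shift (m:Int) (j:Int) a (i - a) hmz (by positivity) (by exact_mod_cast hj)
            (by rw [← hmod]; exact hmodeq) (by omega) (by omega)
        simp only [hmod]
        simp only [beq_iff_eq]
        intro hc
        exact this (by rwa [show a + (i - a) = i by ring])
      rw [hmid_nil]
      have htail :
          (PySem.List.pyRange (min (a + m) b) b 1).filter
            (fun i => PySem.Int.mod i (m : Int) == (j : Int)) = PySem.List.pyRange (a + m) b (m:Int) := by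
        by_cases hend : a + m ≤ b
        · rw [min_eq_left hend]
          apply ih (a + m) b (by omega) (by omega)
          simp only [hmod] at hmodeq ⊢
          have : a + m = a + m * 1 := by ring
          rw [this, Int.add_mul_emod_self_left]
          exact hmodeq
        · rw [min_eq_right (by omega : b ≤ a + m),
              PySem.List.pyRange_one_eq_nil (le_refl b),
              pvRange_pos_nil (a + m) b _ hmz (by omega)]
          rfl
      rw [htail]
      simp

theorem pvFilter_congr_range0 (m j L : Nat) (hm : 0 < m) (hj : j < m) :
    (PySem.List.pyRange 0 (L : Int) 1).filter (fun i => PySem.Int.mod i (m : Int) == (j : Int))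
      = PySem.List.pyRange (j : Int) (L : Int) (m : Int) := by
  have hmz : (0:Int) < (m:Int) := by exact_mod_cast hm
  have hjm : (j:Int) < (m:Int) := by exact_mod_cast hj
  have hpre : ∀ b : Int, b ≤ (j:Int) →
      (PySem.List.pyRange 0 b 1).filter (fun i => PySem.Int.mod i (m : Int) == (j : Int)) = [] := by
    intro b hb
    rw [List.filter_eq_nil_iff]
    intro i hi
    rw [PySem.List.mem_pyRange_one] at hi
    have : PySem.Int.mod i (m:Int) = i := by
      rw [PySem.Int.mod_eq_emod_of_pos hmz]
      exact Int.emod_eq_of_lt (by omega) (by omega)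
    simp [this]; omega
  by_cases hjL : (j:Int) ≤ (L:Int)
  · rw [PySem.List.pyRange_one_append 0 (j:Int) (L:Int) (by positivity) hjL,
        List.filter_append, hpre (j:Int) le_rfl, List.nil_append]
    apply pvFilter_congr_range m j hm hj ((L:Int) - (j:Int)).toNat (j:Int) (L:Int)
      (by positivity) le_rfl
    rw [PySem.Int.mod_eq_emod_of_pos hmz]
    exact Int.emod_eq_of_lt (by positivity) hjm
  · rw [hpre (L:Int) (by omega), pvRange_pos_nil _ _ _ hmz (by omega)]

theorem pvMapIdx_id (acc : List (List Int)) : List.mapIdx (fun _ b => b) acc = acc := by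
  induction acc with
  | nil => rfl
  | cons x l ih => rw [List.mapIdx_cons]; simpa using ih

theorem pvFold_invariant (n : Int) (hn : 0 < n) :
    ∀ (seq : List Int) (s : Int) (acc : List (List Int)), acc.length = n.toNat →
      List.foldl (fun acc p => acc.modify (PySem.Int.mod p.1 n).toNat (fun b => b ++ [p.2])) acc
          (PySem.List.enumerate seq s)
        = acc.mapIdx (fun j b =>
            b ++ ((PySem.List.enumerate seq s).filter
                    (fun p => PySem.Int.mod p.1 n == (j : Int))).map Prod.snd) := by
  intro seq
  induction seq with
  | nil =>
    intro s acc hlen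
    simp [PySem.List.enumerate]
    exact (pvMapIdx_id acc).symm
  | cons x t ih =>
    intro s acc hlen
    rw [PySem.List.enumerate_cons, List.foldl_cons]
    rw [ih (s + 1) (acc.modify (PySem.Int.mod s n).toNat (fun b => b ++ [x]))
        (by rw [List.length_modify]; exact hlen)]
    apply List.ext_getElem
    · simp
    · intro k h1 h2
      simp only [List.getElem_mapIdx, List.getElem_modify]
      have hk : k < acc.length := by simpa using h2
      have hmodlt : PySem.Int.mod s n < n := PySem.Int.mod_lt s hn
      have hmodnn : 0 ≤ PySem.Int.mod s n := PySem.Int.mod_nonneg s hn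
      have hiff : ((PySem.Int.mod s n).toNat = k) ↔ (PySem.Int.mod s n == (k : Int)) = true := by
        simp [beq_iff_eq]; omega
      rw [List.filter_cons]
      by_cases hc : (PySem.Int.mod s n == (k : Int)) = true
      · rw [if_pos (hiff.mpr hc), if_pos hc]
        simp
      · rw [if_neg (fun h => hc (hiff.mp h)), if_neg hc]

theorem pvSlice_step (seq : List Int) (j m : Nat) (hm : 0 < m) :
    PySem.List.slice? seq (some (j : Int)) none (m : Int)
      = some ((PySem.List.pyRange (min (j : Int) seq.length) (seq.length : Int) (m : Int)).filterMap
                (fun i => seq[i.toNat]?)) := by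
  have hmz : (0:Int) < (m:Int) := by exact_mod_cast hm
  rw [PySem.List.pyRange_of_pos _ _ hmz, List.filterMap_map]
  simp only [PySem.List.slice?, PySem.List.sliceIndices]
  rw [if_neg (by omega : ¬ (m:Int) = 0)]
  simp only [if_neg (by omega : ¬ (m:Int) < 0), if_pos hmz,
    if_neg (by omega : ¬ (j:Int) < 0), Function.comp]

theorem pvFilterMap_eq_map {α β : Type} (l : List α) (g : α → Option β) (f : α → β)
    (h : ∀ i ∈ l, g i = some (f i)) : l.filterMap g = l.map f := by
  induction l with
  | nil => rfl
  | cons x t ih =>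
    rw [List.filterMap_cons, h x (List.mem_cons_self), List.map_cons,
        ih (fun i hi => h i (List.mem_cons_of_mem x hi))]

theorem pvBucket_eq (seq : List Int) (m j : Nat) (hm : 0 < m) (hj : j < m) :
    ((PySem.List.enumerate seq 0).filter (fun p => PySem.Int.mod p.1 (m : Int) == (j : Int))).map Prod.snd
      = (PySem.List.slice? seq (some (j : Int)) none (m : Int)).getD [] := by
  have hmz : (0:Int) < (m:Int) := by exact_mod_cast hm
  rw [pvSlice_step seq j m hm, Option.getD_some,
      PySem.List.enumerate_eq_map_pyRange seq 0, List.filter_map, List.map_map]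
  have hlen : PySem.List.len seq = (seq.length : Int) := PySem.List.len_eq seq
  rw [hlen]
  have hfilt :
      (List.filter ((fun p => PySem.Int.mod p.1 (m:Int) == (j:Int)) ∘ fun i => (i, PySem.List.pyGetD seq i 0))
        (PySem.List.pyRange 0 (seq.length : Int) 1))
      = PySem.List.pyRange (j : Int) (seq.length : Int) (m : Int) := by
    rw [← pvFilter_congr_range0 m j seq.length hm hj]
    rfl
  rw [hfilt]
  by_cases hjL : (j : Int) ≤ (seq.length : Int)
  · rw [min_eq_left hjL]
    symm
    apply pvFilterMap_eq_map
    intro i hi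
    rw [PySem.List.mem_pyRange_iff_of_pos hmz] at hi
    have h1 : i.toNat < seq.length := by omega
    rw [List.getElem?_eq_getElem h1]
    simp only [Function.comp]
    rw [PySem.List.pyGetD_of_nonneg seq 0 (by omega), List.getD_eq_getElem _ _ h1]
  · rw [min_eq_right (by omega), pvRange_pos_nil _ _ _ hmz le_rfl,
        pvRange_pos_nil _ _ _ hmz (by omega)]
    rfl

-- ===== VERDICT (by name: the statement is the Claim_ definition above) =====
theorem custom_array_split_py_spec : Claim_equal_custom_array_split_py := by
  intro feature_types feature_indices num_splits _hdom hpre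
  unfold Pre_custom_array_split_py at hpre
  unfold Spec_custom_array_split_py
  obtain ⟨hzip, hns⟩ := hpre
  set m := num_splits.toNat with hmdef
  have hm : 0 < m := by omega
  have hns' : num_splits = (m : Int) := by omega
  set seq := (PySem.List.sorted2 (List.zip feature_types feature_indices) Prod.fst Prod.snd).map Prod.snd with hseq
  simp only [custom_array_split_py, custom_array_split_py_alt, ← hseq]
  rw [hns', PySem.List.pyRange_zero_natCast m, List.map_map, List.map_map]
  rw [pvFold_invariant (m : Int) (by exact_mod_cast hm) seq 0
      ((List.range m).map ((fun _ => ([] : List Int)) ∘ (fun k : Nat => (k : Int))))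
      (by simp)]
  apply List.ext_getElem
  · simp
  · intro k h1 h2
    simp only [List.getElem_mapIdx, List.getElem_map, List.getElem_range, Function.comp]
    have hk : k < m := by simpa using h2
    rw [List.nil_append]
    exact pvBucket_eq seq m k hm hk
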